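-- pv_equiv track=rewrite | github.com/great-history/gui-rixs | edrixs/fock_basis.py | get_fock_basis_by_N_abelian
-- ===== SOURCE A (Python) =====
-- def get_fock_half_N(N):
--     res = [[] for i in range(N + 1)]
--     for i in range(2**N):
--         occu = bin(i).count('1')
--         res[occu].append(i)
--     return res
--
-- def get_fock_full_N(norb, N):
--
--     res = []
--     half_N = get_fock_half_N(norb // 2)
--     for m in range(norb // 2 + 1):
--         n = N - m
--         if n >= 0 and n <= norb // 2:
--             res.extend([i * 2**(norb // 2) + j for i in half_N[m] for j in half_N[n]])
--     return res
--
-- def get_fock_basis_by_N_abelian(norb, N, a_list):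
--
--     result = get_fock_full_N(norb, N)
--     min_a, max_a = min(a_list) * N, max(a_list) * N
--     basis = {}
--     for i in range(min_a, max_a + 1):
--         basis[i] = []
--     for n in result:
--         a = sum([a_list[i] for i in range(0, n.bit_length()) if (n >> i & 1)])
--         basis[a].append(n)
--     return basis
-- ===== SOURCE B (Python) =====
-- def get_fock_basis_by_N_abelian(norb, N, a_list):
--     h = norb // 2
--     min_a, max_a = min(a_list) * N, max(a_list) * N
--     basis = {a: [] for a in range(min_a, max_a + 1)}
--     buckets = [[] for _ in range(h + 1)]
--     for s in range(2 ** h):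
--         buckets[bin(s).count('1')].append(s)
--
--     def wsum(s, off):
--         t, b = 0, 0
--         while s:
--             if s & 1:
--                 t += a_list[off + b]
--             s >>= 1
--             b += 1
--         return t
--
--     shift = 2 ** h
--     for m in range(max(0, N - h), min(h, N) + 1):
--         hi = [(i * shift, wsum(i, h)) for i in buckets[m]]
--         lo = [(j, wsum(j, 0)) for j in buckets[N - m]]
--         for ib, ai in hi:
--             for j, aj in lo:
--                 basis[ai + aj].append(ib + j)
--     return basis
-- ===== Notes on version B (the rewrite author's own statement) =====
-- stated objective: alternative
-- what changed: Instead of materialising the full list of states and then recomputing the weighted bit-sum of every full state bit by bit, B buckets the 2^(norb//2) half-states by occupation and obtains each state's quantum number as the sum of two per-half partial sums, appending straight into the basis dict.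
import Mathlib
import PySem

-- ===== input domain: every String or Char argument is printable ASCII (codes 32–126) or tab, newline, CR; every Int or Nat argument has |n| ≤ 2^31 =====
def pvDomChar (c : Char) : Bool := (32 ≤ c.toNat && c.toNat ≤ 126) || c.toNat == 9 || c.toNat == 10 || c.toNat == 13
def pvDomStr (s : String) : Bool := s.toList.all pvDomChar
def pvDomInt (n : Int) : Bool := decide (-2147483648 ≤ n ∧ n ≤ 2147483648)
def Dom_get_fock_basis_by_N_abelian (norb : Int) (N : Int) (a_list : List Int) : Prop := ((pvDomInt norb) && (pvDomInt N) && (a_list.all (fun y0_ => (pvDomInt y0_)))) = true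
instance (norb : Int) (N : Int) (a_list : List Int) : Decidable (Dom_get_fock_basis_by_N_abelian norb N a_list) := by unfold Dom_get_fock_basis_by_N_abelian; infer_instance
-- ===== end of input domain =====

-- B groups Fock states by quantum number via per-half partial a-sums combined per state,
-- instead of A's per-state bit-by-bit sum over the materialised full state list
-- (objective: alternative algorithm of similar cost).

-- ===== PORT A =====

-- bin(i).count('1') for i ≥ 0 (both Pythons use this expression)
def pvPopcount (n : Nat) : Nat :=
  if n = 0 then 0 else n % 2 + pvPopcount (n / 2)
decreasing_by exact Nat.div_lt_self (Nat.pos_of_ne_zero (by assumption)) (by omega)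

-- n.bit_length() for n ≥ 0
def pvBitlen (n : Nat) : Nat :=
  if n = 0 then 0 else pvBitlen (n / 2) + 1
decreasing_by exact Nat.div_lt_self (Nat.pos_of_ne_zero (by assumption)) (by omega)

-- get_fock_half_N
def get_fock_half_N (N : Int) : List (List Int) :=
  let res := (PySem.List.pyRange 0 (N + 1) 1).map (fun _ => ([] : List Int))
  (PySem.List.pyRange 0 ((2 : Int) ^ N.toNat) 1).foldl
    (fun res i => res.modify (pvPopcount i.toNat) (fun l => l ++ [i])) res

-- get_fock_full_N
def get_fock_full_N (norb : Int) (N : Int) : List Int :=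
  let h := PySem.Int.floordiv norb 2
  let half_N := get_fock_half_N h
  (PySem.List.pyRange 0 (h + 1) 1).foldl
    (fun res m =>
      let n := N - m
      if 0 ≤ n ∧ n ≤ h then
        res ++ (PySem.List.pyGetD half_N m []).flatMap
          (fun i => (PySem.List.pyGetD half_N n []).map (fun j => i * (2 : Int) ^ h.toNat + j))
      else res) []

def get_fock_basis_by_N_abelian (norb : Int) (N : Int) (a_list : List Int) : List (Int × List Int) :=
  let result := get_fock_full_N norb N
  let min_a := (PySem.List.min? a_list (fun x => x)).getD 0 * N
  let max_a := (PySem.List.max? a_list (fun x => x)).getD 0 * N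
  let basis := (PySem.List.pyRange min_a (max_a + 1) 1).foldl
    (fun d i => d.insert i ([] : List Int)) (PySem.Dict.empty : PySem.Dict Int (List Int))
  let basis := result.foldl
    (fun d n =>
      let a := (PySem.List.pyRange 0 (pvBitlen n.toNat : Nat) 1).foldl
        (fun s i => if (n.toNat >>> i.toNat) % 2 = 1 then s + PySem.List.pyGetD a_list i 0 else s) 0
      d.modify a [] (fun l => l ++ [n])) basis
  basis.items

-- ===== PORT B =====

-- wsum(s, off) of Source B: t, b run as in the Python while-loop (s ≥ 0)
def pvWsum (a_list : List Int) (off : Int) (s : Nat) (b : Int) (t : Int) : Int :=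
  if s = 0 then t
  else pvWsum a_list off (s / 2) (b + 1)
         (if s % 2 = 1 then t + PySem.List.pyGetD a_list (off + b) 0 else t)
decreasing_by exact Nat.div_lt_self (Nat.pos_of_ne_zero (by assumption)) (by omega)

def get_fock_basis_by_N_abelian_alt (norb : Int) (N : Int) (a_list : List Int) : List (Int × List Int) :=
  let h := PySem.Int.floordiv norb 2
  let min_a := (PySem.List.min? a_list (fun x => x)).getD 0 * N
  let max_a := (PySem.List.max? a_list (fun x => x)).getD 0 * N
  let basis := (PySem.List.pyRange min_a (max_a + 1) 1).foldl
    (fun d a => d.insert a ([] : List Int)) (PySem.Dict.empty : PySem.Dict Int (List Int))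
  let buckets := (PySem.List.pyRange 0 ((2 : Int) ^ h.toNat) 1).foldl
    (fun bs s => bs.modify (pvPopcount s.toNat) (fun l => l ++ [s]))
    ((PySem.List.pyRange 0 (h + 1) 1).map (fun _ => ([] : List Int)))
  let shift : Int := (2 : Int) ^ h.toNat
  let basis := (PySem.List.pyRange (max 0 (N - h)) (min h N + 1) 1).foldl
    (fun d m =>
      let hi := (PySem.List.pyGetD buckets m []).map (fun i => (i * shift, pvWsum a_list h i.toNat 0 0))
      let lo := (PySem.List.pyGetD buckets (N - m) []).map (fun j => (j, pvWsum a_list 0 j.toNat 0 0))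
      hi.foldl (fun d p => lo.foldl
        (fun d q => d.modify (p.2 + q.2) [] (fun l => l ++ [p.1 + q.1])) d) d)
    basis
  basis.items

-- ===== PRECONDITION & SPEC =====
-- Pre_ excludes exactly the inputs on which the Python A raises: empty a_list (min() raises
-- ValueError), negative norb (range(2**norb//2) raises TypeError), and a_list shorter than the
-- 2*(norb//2) used bit positions when some state is actually produced, i.e. 1 ≤ N ≤ 2*(norb//2)
-- (a_list[i] raises IndexError).
def Pre_get_fock_basis_by_N_abelian (norb : Int) (N : Int) (a_list : List Int) : Prop :=
  a_list ≠ [] ∧ 0 ≤ norb ∧ (1 ≤ N → N ≤ 2 * (norb / 2) → 2 * (norb / 2) ≤ (a_list.length : Int))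
instance (norb : Int) (N : Int) (a_list : List Int) : Decidable (Pre_get_fock_basis_by_N_abelian norb N a_list) := by
  unfold Pre_get_fock_basis_by_N_abelian; infer_instance

def pvWitness_get_fock_basis_by_N_abelian : Int × Int × List Int := (4, 2, [1, -1, 2, 1])

def Spec_get_fock_basis_by_N_abelian (norb : Int) (N : Int) (a_list : List Int) (out : List (Int × List Int)) : Prop := out = get_fock_basis_by_N_abelian_alt norb N a_list
instance (norb : Int) (N : Int) (a_list : List Int) (out : List (Int × List Int)) : Decidable (Spec_get_fock_basis_by_N_abelian norb N a_list out) := by unfold Spec_get_fock_basis_by_N_abelian; infer_instance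

-- ===== CLAIM (what is proved, stated in full; the proofs are below) =====
def Claim_equal_get_fock_basis_by_N_abelian : Prop := ∀ (norb : Int) (N : Int) (a_list : List Int), Dom_get_fock_basis_by_N_abelian norb N a_list → Pre_get_fock_basis_by_N_abelian norb N a_list → Spec_get_fock_basis_by_N_abelian norb N a_list (get_fock_basis_by_N_abelian norb N a_list)

-- ===== LEMMAS AND PROOFS =====

-- the weighted bit-sum ∑_{set bits b of n} a[off+b], the common value of A's key and B's wsum
def pvSkey (a : List Int) (off : Nat) (n : Nat) : Int :=
  if n = 0 then 0 else (if n % 2 = 1 then a.getD off 0 else 0) + pvSkey a (off + 1) (n / 2)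
decreasing_by exact Nat.div_lt_self (Nat.pos_of_ne_zero (by assumption)) (by omega)

theorem pvSkey_zero (a : List Int) (off : Nat) : pvSkey a off 0 = 0 := by
  rw [pvSkey]; simp

theorem pvWsum_eq_skey (a : List Int) (off : Int) (hoff : 0 ≤ off) :
    ∀ (s : Nat) (b t : Int), 0 ≤ b → pvWsum a off s b t = t + pvSkey a (off + b).toNat s := by
  intro s
  induction s using Nat.strong_induction_on with
  | _ s ih =>
    intro b t hb
    rw [pvWsum, pvSkey]
    by_cases hs : s = 0
    · simp [hs]
    · simp only [hs, if_false]
      rw [ih (s / 2) (Nat.div_lt_self (Nat.pos_of_ne_zero hs) (by omega)) (b + 1) _ (by omega)]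
      have h1 : (off + (b + 1)).toNat = (off + b).toNat + 1 := by omega
      have h2 : PySem.List.pyGetD a (off + b) 0 = a.getD (off + b).toNat 0 := by
        have := PySem.List.pyGetD_natCast a (off + b).toNat (0 : Int)
        rwa [Int.toNat_of_nonneg (by omega : (0:Int) ≤ off + b)] at this
      rw [h1, h2]
      split_ifs <;> ring

theorem pvSkey_drop (a : List Int) :
    ∀ (n : Nat) (off : Nat), pvSkey a (off + 1) n = pvSkey (a.drop 1) off n := by
  intro n
  induction n using Nat.strong_induction_on with
  | _ n ih =>
    intro off
    by_cases hn : n = 0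
    · simp [hn, pvSkey_zero]
    · have hL : pvSkey a (off + 1) n
          = (if n % 2 = 1 then a.getD (off + 1) 0 else 0) + pvSkey a (off + 1 + 1) (n / 2) := by
        rw [pvSkey]; simp [hn]
      have hR : pvSkey (a.drop 1) off n
          = (if n % 2 = 1 then (a.drop 1).getD off 0 else 0) + pvSkey (a.drop 1) (off + 1) (n / 2) := by
        rw [pvSkey]; simp [hn]
      have hg : a.getD (off + 1) 0 = (a.drop 1).getD off 0 := by
        simp [List.getD_eq_getElem?_getD]
      rw [hL, hR, hg, ih (n / 2) (Nat.div_lt_self (Nat.pos_of_ne_zero hn) (by omega)) (off + 1)]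

-- A's key-sum loop computes pvSkey a 0 n
theorem pvKeyA_eq_skey :
    ∀ (n : Nat) (a : List Int) (acc : Int),
      (PySem.List.pyRange 0 (pvBitlen n : Nat) 1).foldl
        (fun s i => if (n >>> i.toNat) % 2 = 1 then s + PySem.List.pyGetD a i 0 else s) acc
      = acc + pvSkey a 0 n := by
  intro n
  induction n using Nat.strong_induction_on with
  | _ n ih =>
    intro a acc
    by_cases hn : n = 0
    · subst hn
      rw [pvBitlen]
      simp [PySem.List.pyRange_one_eq_nil, pvSkey_zero]
    · rw [pvBitlen]; simp only [hn, if_false]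
      have hcons : PySem.List.pyRange 0 ((pvBitlen (n / 2) + 1 : Nat) : Int) 1
          = 0 :: PySem.List.pyRange 1 ((pvBitlen (n / 2) + 1 : Nat) : Int) 1 := by
        exact PySem.List.pyRange_one_cons (by exact_mod_cast Nat.succ_pos _)
      rw [hcons]
      simp only [List.foldl_cons]
      have hrw : PySem.List.pyRange 1 ((pvBitlen (n / 2) + 1 : Nat) : Int) 1
          = (List.range (pvBitlen (n / 2))).map (fun k : Nat => (1 : Int) + k) := by
        rw [PySem.List.pyRange_one,
          show ((((pvBitlen (n / 2) + 1 : Nat)) : Int) - 1).toNat = pvBitlen (n / 2) by omega]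
      have hrw2 : PySem.List.pyRange 0 ((pvBitlen (n / 2) : Nat) : Int) 1
          = (List.range (pvBitlen (n / 2))).map (fun k : Nat => (0 : Int) + k) := by
        rw [PySem.List.pyRange_one,
          show ((((pvBitlen (n / 2) : Nat)) : Int) - 0).toNat = pvBitlen (n / 2) by omega]
      set acc1 := if n % 2 = 1 then acc + PySem.List.pyGetD a 0 0 else acc with hacc1
      have hstep : ∀ (s : Int) (k : Nat),
          (if (n >>> ((1 : Int) + k).toNat) % 2 = 1 then s + PySem.List.pyGetD a ((1 : Int) + k) 0 else s)
          = (if ((n / 2) >>> ((0 : Int) + k).toNat) % 2 = 1 then s + PySem.List.pyGetD (a.drop 1) ((0 : Int) + k) 0 else s) := by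
        intro s k
        have h1 : ((1 : Int) + k).toNat = k + 1 := by omega
        have h2 : ((0 : Int) + k).toNat = k := by omega
        have h3 : n >>> (k + 1) = (n / 2) >>> k := by
          rw [show k + 1 = 1 + k by omega, Nat.shiftRight_add, Nat.shiftRight_one]
        have h4 : PySem.List.pyGetD a ((1 : Int) + k) 0 = PySem.List.pyGetD (a.drop 1) ((0 : Int) + k) 0 := by
          rw [show (1 : Int) + k = (((k + 1 : Nat)) : Int) by omega,
              show (0 : Int) + k = ((k : Nat) : Int) by omega,
              PySem.List.pyGetD_natCast, PySem.List.pyGetD_natCast]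
          simp [List.getD_eq_getElem?_getD]
        rw [h1, h2, h3, h4]
      rw [hrw, List.foldl_map]
      have hmain := ih (n / 2) (Nat.div_lt_self (Nat.pos_of_ne_zero hn) (by omega)) (a.drop 1) acc1
      rw [hrw2, List.foldl_map] at hmain
      have hfinal : acc1 + pvSkey (a.drop 1) 0 (n / 2) = acc + pvSkey a 0 n := by
        have hexp : pvSkey a 0 n
            = (if n % 2 = 1 then a.getD 0 0 else 0) + pvSkey a (0 + 1) (n / 2) := by
          rw [pvSkey]; simp [hn]
        rw [hexp, pvSkey_drop a (n / 2) 0]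
        have hg0 : PySem.List.pyGetD a 0 0 = a.getD 0 0 := by
          rw [show (0 : Int) = ((0 : Nat) : Int) by rfl, PySem.List.pyGetD_natCast]
        rw [hacc1, hg0]
        split_ifs <;> ring
      exact ((PySem.List.foldl_congr_mem _ _ _ acc1 (fun s k _ => hstep s k)).trans hmain).trans hfinal

-- splitting the weighted bit-sum of i * 2^H + j at bit H (j < 2^H)
theorem pvSkey_split (a : List Int) :
    ∀ (H : Nat) (i j off : Nat), j < 2 ^ H →
      pvSkey a off (i * 2 ^ H + j) = pvSkey a off j + pvSkey a (off + H) i := by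
  intro H
  induction H with
  | zero =>
    intro i j off hj
    interval_cases j
    simp [pvSkey_zero]
  | succ H ih =>
    intro i j off hj
    have hpow : (2 : Nat) ^ (H + 1) = 2 * 2 ^ H := by ring
    by_cases hn : i * 2 ^ (H + 1) + j = 0
    · have hi : i = 0 := by
        rcases Nat.mul_eq_zero.mp (by omega : i * 2 ^ (H + 1) = 0) with h | h
        · exact h
        · exact absurd h (by positivity)
      have hj0 : j = 0 := by omega
      simp [hi, hj0, pvSkey_zero]
    · rw [pvSkey]
      simp only [hn, if_false]
      have hc : i * 2 ^ (H + 1) = 2 * (i * 2 ^ H) := by ring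
      have hmod : (i * 2 ^ (H + 1) + j) % 2 = j % 2 := by omega
      have hdiv : (i * 2 ^ (H + 1) + j) / 2 = i * 2 ^ H + j / 2 := by omega
      have hj2 : j / 2 < 2 ^ H := by rw [hpow] at hj; omega
      rw [hmod, hdiv, ih i (j / 2) (off + 1) hj2]
      by_cases hj0 : j = 0
      · subst hj0
        simp [pvSkey_zero, show off + 1 + H = off + (H + 1) by omega]
      · rw [show pvSkey a off j
            = (if j % 2 = 1 then a.getD off 0 else 0) + pvSkey a (off + 1) (j / 2) by
              rw [pvSkey]; simp [hj0]]
        rw [show off + 1 + H = off + (H + 1) by omega]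
        ring

-- membership form of List.modify
theorem pv_mem_modify {α : Type} :
    ∀ (bs : List α) (k : Nat) (g : α → α) (l : α), l ∈ bs.modify k g → l ∈ bs ∨ ∃ l' ∈ bs, l = g l' := by
  intro bs
  induction bs with
  | nil =>
    intro k g l h
    cases k with
    | zero => exact absurd (show l ∈ ([] : List α) from h) (by simp)
    | succ k => exact absurd (show l ∈ ([] : List α) from h) (by simp)
  | cons b tl ih =>
    intro k g l h
    cases k with
    | zero =>
      rcases List.mem_cons.mp (show l ∈ g b :: tl from h) with h | h
      · exact Or.inr ⟨b, List.mem_cons_self, h⟩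
      · exact Or.inl (List.mem_cons_of_mem _ h)
    | succ k =>
      rcases List.mem_cons.mp (show l ∈ b :: tl.modify k g from h) with h | h
      · exact Or.inl (h ▸ List.mem_cons_self)
      · rcases ih k g l h with h | ⟨l', hl', he⟩
        · exact Or.inl (List.mem_cons_of_mem _ h)
        · exact Or.inr ⟨l', List.mem_cons_of_mem _ hl', he⟩

-- every element of every bucket of the bucket-building fold satisfies the element bound
theorem pv_buckets_bound (P : Int → Prop) :
    ∀ (xs : List Int) (bs : List (List Int)),
      (∀ l ∈ bs, ∀ y ∈ l, P y) → (∀ x ∈ xs, P x) →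
      ∀ l ∈ xs.foldl (fun bs x => bs.modify (pvPopcount x.toNat) (fun l => l ++ [x])) bs,
        ∀ y ∈ l, P y := by
  intro xs
  induction xs with
  | nil => intro bs hbs _; simpa using hbs
  | cons x tl ih =>
    intro bs hbs hxs
    simp only [List.foldl_cons]
    apply ih
    · intro l hl y hy
      rcases pv_mem_modify bs (pvPopcount x.toNat) _ l hl with h | ⟨l', hl', he⟩
      · exact hbs l h y hy
      · subst he
        rcases List.mem_append.mp hy with h | h
        · exact hbs l' hl' y h
        · simp at h; subst h; exact hxs _ List.mem_cons_self
    · exact fun z hz => hxs z (List.mem_cons_of_mem _ hz)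

-- foldl over flatMap = nested foldl
theorem pv_foldl_flatMap {α β γ : Type} (g : α → List β) (f : γ → β → γ) :
    ∀ (l : List α) (init : γ),
      (l.flatMap g).foldl f init = l.foldl (fun acc x => (g x).foldl f acc) init := by
  intro l
  induction l with
  | nil => intro init; simp
  | cons x tl ih => intro init; simp [List.foldl_append, ih]

-- foldl with identity body
theorem pv_foldl_id {α β : Type} (l : List α) (init : β) :
    l.foldl (fun acc _ => acc) init = init := by
  induction l generalizing init with
  | nil => rfl
  | cons x tl ih => simp only [List.foldl_cons]; exact ih init

-- key fact: A's per-state key equals B's combined half-sums, for 0 ≤ i, 0 ≤ j < 2^H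
theorem pv_key_combine (a : List Int) (H : Nat) (i j : Int) (hi : 0 ≤ i) (hj : 0 ≤ j)
    (hjlt : j < (2 : Int) ^ H) :
    (PySem.List.pyRange 0 (pvBitlen (i * (2 : Int) ^ H + j).toNat : Nat) 1).foldl
      (fun s b => if ((i * (2 : Int) ^ H + j).toNat >>> b.toNat) % 2 = 1
        then s + PySem.List.pyGetD a b 0 else s) 0
    = pvWsum a H i.toNat 0 0 + pvWsum a 0 j.toNat 0 0 := by
  have hs : (i * (2 : Int) ^ H + j).toNat = i.toNat * 2 ^ H + j.toNat := by
    have hi' : ((i.toNat : Nat) : Int) = i := Int.toNat_of_nonneg hi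
    have hj' : ((j.toNat : Nat) : Int) = j := Int.toNat_of_nonneg hj
    have hsum : i * (2 : Int) ^ H + j = ((i.toNat * 2 ^ H + j.toNat : Nat) : Int) := by
      push_cast [hi', hj']; ring
    rw [hsum, Int.toNat_natCast]
  have hjn : j.toNat < 2 ^ H := by
    have h2 : ((2 : Int) ^ H) = ((2 ^ H : Nat) : Int) := by push_cast; ring
    omega
  rw [pvKeyA_eq_skey, hs, pvSkey_split a H i.toNat j.toNat 0 hjn]
  rw [pvWsum_eq_skey a H (by positivity) i.toNat 0 0 (by omega),
      pvWsum_eq_skey a 0 (by omega) j.toNat 0 0 (by omega)]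
  have hH : ((H : Int) + 0).toNat = 0 + H := by omega
  have h0 : ((0 : Int) + 0).toNat = 0 := by rfl
  rw [hH, h0]
  ring

-- A's append step into the basis dict (proof-side name)
def pvStep (a_list : List Int) (d : PySem.Dict Int (List Int)) (n : Int) : PySem.Dict Int (List Int) :=
  d.modify ((PySem.List.pyRange 0 (pvBitlen n.toNat : Nat) 1).foldl
      (fun s i => if (n.toNat >>> i.toNat) % 2 = 1 then s + PySem.List.pyGetD a_list i 0 else s) 0)
    [] (fun l => l ++ [n])

-- elements drawn from half_N/buckets lie in [0, 2^H)
theorem pv_half_mem (h : Int) (idx : Int) (y : Int)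
    (hy : y ∈ PySem.List.pyGetD (get_fock_half_N h) idx ([] : List Int)) :
    0 ≤ y ∧ y < (2 : Int) ^ h.toNat := by
  have hsub : ∃ l ∈ get_fock_half_N h, y ∈ l := by
    by_cases hr : PySem.Raise.InRange (get_fock_half_N h).length idx
    · exact ⟨_, PySem.List.pyGetD_mem _ _ hr, hy⟩
    · exfalso
      rw [PySem.List.pyGetD_of_none] at hy
      · simp at hy
      · exact (PySem.List.pyGet?_eq_none_iff _ _).mpr hr
  rcases hsub with ⟨l, hl, hyl⟩
  refine pv_buckets_bound (fun x => 0 ≤ x ∧ x < (2 : Int) ^ h.toNat) _ _ ?_ ?_ l hl y hyl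
  · intro l' hl' z hz
    rcases List.mem_map.mp hl' with ⟨_, _, he⟩
    subst he; simp at hz
  · intro x hx
    exact (PySem.List.mem_pyRange_one).mp hx

-- per-m core: A's fold of the per-m chunk equals B's nested per-m loops
theorem pv_per_m (a : List Int) (h m N : Int) (hh : 0 ≤ h)
    (d : PySem.Dict Int (List Int)) :
    (((PySem.List.pyGetD (get_fock_half_N h) m ([] : List Int)).flatMap
        (fun i => (PySem.List.pyGetD (get_fock_half_N h) (N - m) ([] : List Int)).map
          (fun j => i * (2 : Int) ^ h.toNat + j))).foldl (pvStep a) d)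
    = ((PySem.List.pyGetD (get_fock_half_N h) m ([] : List Int)).map
        (fun i => (i * (2 : Int) ^ h.toNat, pvWsum a h i.toNat 0 0))).foldl
        (fun d p => (((PySem.List.pyGetD (get_fock_half_N h) (N - m) ([] : List Int)).map
            (fun j => (j, pvWsum a 0 j.toNat 0 0))).foldl
          (fun d q => d.modify (p.2 + q.2) [] (fun l => l ++ [p.1 + q.1])) d)) d := by
  rw [pv_foldl_flatMap, List.foldl_map]
  apply PySem.List.foldl_congr_mem
  intro d' i hi
  rw [List.foldl_map, List.foldl_map]
  apply PySem.List.foldl_congr_mem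
  intro d'' j hj
  rcases pv_half_mem h m i hi with ⟨hi0, _⟩
  rcases pv_half_mem h (N - m) j hj with ⟨hj0, hjlt⟩
  unfold pvStep
  rw [show h = ((h.toNat : Nat) : Int) from (Int.toNat_of_nonneg hh).symm]
  simp only [Int.toNat_natCast]
  congr 1
  exact pv_key_combine a h.toNat i j hi0 hj0 hjlt

-- the two ports compute the same dict (hence the same items), for all inputs
theorem pv_dict_eq (norb : Int) (N : Int) (a : List Int) :
    get_fock_basis_by_N_abelian norb N a = get_fock_basis_by_N_abelian_alt norb N a := by
  unfold get_fock_basis_by_N_abelian get_fock_basis_by_N_abelian_alt get_fock_full_N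
  dsimp only
  congr 1
  set h := PySem.Int.floordiv norb 2 with hh
  set basis0 := (PySem.List.pyRange ((PySem.List.min? a fun x => x).getD 0 * N)
      ((PySem.List.max? a fun x => x).getD 0 * N + 1) 1).foldl
      (fun d i => d.insert i ([] : List Int)) (PySem.Dict.empty : PySem.Dict Int (List Int)) with hb0
  -- B's inline buckets are A's get_fock_half_N h
  have hbk : ((PySem.List.pyRange 0 ((2 : Int) ^ h.toNat) 1).foldl
      (fun bs s => bs.modify (pvPopcount s.toNat) (fun l => l ++ [s]))
      ((PySem.List.pyRange 0 (h + 1) 1).map (fun _ => ([] : List Int))))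
      = get_fock_half_N h := rfl
  rw [hbk]
  rw [show (fun (d : PySem.Dict Int (List Int)) (n : Int) => d.modify
        ((PySem.List.pyRange 0 (pvBitlen n.toNat : Nat) 1).foldl
          (fun s i => if (n.toNat >>> i.toNat) % 2 = 1 then s + PySem.List.pyGetD a i 0 else s) 0)
        [] (fun l => l ++ [n])) = pvStep a from rfl]
  set half := get_fock_half_N h with hhalf
  set C : Int → List Int := fun m =>
    (PySem.List.pyGetD half m ([] : List Int)).flatMap
      (fun i => (PySem.List.pyGetD half (N - m) ([] : List Int)).map
        (fun j => i * (2 : Int) ^ h.toNat + j)) with hC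
  -- step 1: A's result list is the flatMap of guarded chunks
  have h1 : ((PySem.List.pyRange 0 (h + 1) 1).foldl
      (fun res m => if 0 ≤ N - m ∧ N - m ≤ h then res ++ C m else res) ([] : List Int))
      = (PySem.List.pyRange 0 (h + 1) 1).flatMap
          (fun m => if 0 ≤ N - m ∧ N - m ≤ h then C m else []) := by
    rw [PySem.List.foldl_congr_mem _ _
      (fun res m => res ++ (if 0 ≤ N - m ∧ N - m ≤ h then C m else [])) []
      (by intro res m _
          beta_reduce
          by_cases hg : 0 ≤ N - m ∧ N - m ≤ h
          · rw [if_pos hg, if_pos hg]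
          · rw [if_neg hg, if_neg hg, List.append_nil])]
    rw [PySem.List.foldl_append_eq_flatMap]
    simp
  rw [h1]
  -- step 2: fold A's step over the flatMap = guarded per-m folds
  rw [pv_foldl_flatMap]
  have h2 : ∀ (d : PySem.Dict Int (List Int)) (m : Int),
      ((if 0 ≤ N - m ∧ N - m ≤ h then C m else []).foldl (pvStep a) d)
      = (if 0 ≤ N - m ∧ N - m ≤ h then (C m).foldl (pvStep a) d else d) := by
    intro d m
    by_cases hg : 0 ≤ N - m ∧ N - m ≤ h
    · rw [if_pos hg, if_pos hg]
    · rw [if_neg hg, if_neg hg, List.foldl_nil]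
  -- step 3: split the m-range
  by_cases hlt : max 0 (N - h) < min h N + 1
  · have hsp1 : PySem.List.pyRange 0 (h + 1) 1
        = PySem.List.pyRange 0 (max 0 (N - h)) 1 ++ PySem.List.pyRange (max 0 (N - h)) (h + 1) 1 := by
      exact PySem.List.pyRange_one_append _ _ _ (by omega) (by omega)
    have hsp2 : PySem.List.pyRange (max 0 (N - h)) (h + 1) 1
        = PySem.List.pyRange (max 0 (N - h)) (min h N + 1) 1 ++ PySem.List.pyRange (min h N + 1) (h + 1) 1 := by
      exact PySem.List.pyRange_one_append _ _ _ (by omega) (by omega)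
    rw [hsp1, hsp2, List.foldl_append, List.foldl_append]
    -- first segment: guards false
    rw [PySem.List.foldl_congr_mem _ _ (fun d _ => d) basis0
      (by intro d m hm
          beta_reduce
          rcases PySem.List.mem_pyRange_one.mp hm with ⟨hm0, hm1⟩
          rw [h2]
          have : ¬ (0 ≤ N - m ∧ N - m ≤ h) := by omega
          rw [if_neg this]), pv_foldl_id]
    -- third segment: guards false
    rw [PySem.List.foldl_congr_mem (PySem.List.pyRange (min h N + 1) (h + 1) 1) _ (fun d _ => d) _
      (by intro d m hm
          beta_reduce
          rcases PySem.List.mem_pyRange_one.mp hm with ⟨hm0, hm1⟩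
          rw [h2]
          have : ¬ (0 ≤ N - m ∧ N - m ≤ h) := by omega
          rw [if_neg this]), pv_foldl_id]
    -- middle segment: guards true; per-m equality
    apply PySem.List.foldl_congr_mem
    intro d m hm
    beta_reduce
    rcases PySem.List.mem_pyRange_one.mp hm with ⟨hm0, hm1⟩
    rw [h2]
    have hg : 0 ≤ N - m ∧ N - m ≤ h := by omega
    rw [if_pos hg, hC]
    exact pv_per_m a h m N (by omega) d
  · -- no admissible m: both folds leave basis0 unchanged
    rw [PySem.List.foldl_congr_mem _ _ (fun d _ => d) basis0
      (by intro d m hm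
          beta_reduce
          rcases PySem.List.mem_pyRange_one.mp hm with ⟨hm0, hm1⟩
          rw [h2]
          have : ¬ (0 ≤ N - m ∧ N - m ≤ h) := by omega
          rw [if_neg this]), pv_foldl_id]
    rw [PySem.List.pyRange_one_eq_nil (by omega)]
    rfl

-- ===== VERDICT (by name: the statement is the Claim_ definition above) =====
theorem get_fock_basis_by_N_abelian_spec : Claim_equal_get_fock_basis_by_N_abelian := by
  intro norb N a _ _
  unfold Spec_get_fock_basis_by_N_abelian
  exact pv_dict_eq norb N a
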